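-- pv_equiv track=rewrite | github.com/Kuhron/programming | NumberTheory/PrimeSpan.py | fill_out_digit_position_array
-- ===== SOURCE A (Python) =====
-- import itertools
--
-- def fill_out_digit_position_array(position_array, digits_to_fill_in_slots, fillable_slot_value=0):
--     # wherever the array has the fillable slot value, put each of the values in digits_to_fill_in_slots
--     assert type(digits_to_fill_in_slots) is list
--     is_slot = [x == fillable_slot_value for x in position_array]
--     slot_indices = [i for i,x in enumerate(is_slot) if x is True]
--     n_slots = sum(is_slot)
--
--     if n_slots == 0:
--         # only one way to fill zero slots
--         yield list(position_array)
--     else: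
--         a = [x for x in position_array]
--         for combo in itertools.product(*([digits_to_fill_in_slots]*n_slots)):
--             for i, c in enumerate(combo[::-1]):
--                 slot_index = slot_indices[i]
--                 a[slot_index] = c
--             yield a
-- ===== SOURCE B (Python) =====
-- def fill_out_digit_position_array(position_array, digits_to_fill_in_slots, fillable_slot_value=0):
--     """Backtracking enumerator of all fillings of the slot positions.
--
--     Depth-first over the slots, writing one slot per step, so each output costs
--     amortized O(1) slot writes instead of rewriting every slot per combination.
--     Yields an internal buffer that is reused between yields (copy it if you
--     need to keep a filling).
--     """
--     assert type(digits_to_fill_in_slots) is list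
--     slots = [i for i, x in enumerate(position_array) if x == fillable_slot_value]
--     a = list(position_array)
--
--     def rec(k):
--         if k == len(slots):
--             yield a
--         else:
--             for d in digits_to_fill_in_slots:
--                 a[slots[k]] = d
--                 yield from rec(k + 1)
--
--     yield from rec(0)
-- ===== Notes on version B (the rewrite author's own statement) =====
-- stated objective: alternative
-- what changed: A enumerates combinations with itertools.product and rewrites every slot of the shared buffer for each combination; B is a depth-first backtracking generator over the slot positions that writes a single slot per step (amortized O(1) slot writes per output) into the same kind of shared, reused buffer.
import Mathlib
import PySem

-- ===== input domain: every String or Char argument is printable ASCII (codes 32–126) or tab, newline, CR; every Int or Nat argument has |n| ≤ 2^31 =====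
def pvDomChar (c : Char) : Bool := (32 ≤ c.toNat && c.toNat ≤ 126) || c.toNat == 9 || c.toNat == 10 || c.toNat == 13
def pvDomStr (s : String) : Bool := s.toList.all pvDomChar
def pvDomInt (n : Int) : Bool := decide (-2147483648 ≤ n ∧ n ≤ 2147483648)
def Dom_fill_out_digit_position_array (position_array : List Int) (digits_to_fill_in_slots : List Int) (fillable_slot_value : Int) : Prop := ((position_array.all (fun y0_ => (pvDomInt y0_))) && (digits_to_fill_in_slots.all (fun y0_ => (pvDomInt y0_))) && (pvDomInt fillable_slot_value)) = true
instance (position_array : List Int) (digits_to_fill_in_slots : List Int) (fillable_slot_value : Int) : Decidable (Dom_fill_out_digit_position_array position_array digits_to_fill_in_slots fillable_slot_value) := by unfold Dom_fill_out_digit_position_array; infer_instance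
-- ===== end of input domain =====

-- B replaces A's product loop (which rewrites every slot for each combination) by a depth-first
-- backtracking enumerator that writes one slot per step. Both Pythons are GENERATORS yielding one
-- shared buffer; the equivalence proved is about the materialized value list(...).

-- ===== PORT A =====
-- itertools.product(*([xs]*n)) : the repeated cartesian product, in itertools order
def pvProdRep (xs : List Int) : Nat → List (List Int)
  | 0 => [[]]
  | n + 1 => (pvProdRep xs n).flatMap (fun c => xs.map (fun x => c ++ [x]))

def fill_out_digit_position_array (position_array : List Int) (digits_to_fill_in_slots : List Int) (fillable_slot_value : Int) : List (List Int) :=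
  let is_slot : List Bool := position_array.map (fun x => decide (x = fillable_slot_value))
  let slot_indices : List Int :=
    (PySem.List.enumerate is_slot 0).filterMap (fun p => if p.2 = true then some p.1 else none)
  let n_slots : Int := (is_slot.map (fun b => if b then (1 : Int) else 0)).sum
  if n_slots = 0 then
    [position_array]
  else
    -- a[slot_indices[i]] = c : slot_indices[i] is always a valid nonnegative index, so
    -- pyGetD/pySetD are exact here
    let r :=
      (pvProdRep digits_to_fill_in_slots n_slots.toNat).foldl
        (fun (st : List Int × Nat) combo =>
          let rev := (PySem.List.slice? combo none none (-1)).getD []   -- combo[::-1]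
          ((PySem.List.enumerate rev 0).foldl
              (fun a p => PySem.List.pySetD a (PySem.List.pyGetD slot_indices p.1 0) p.2) st.1,
           st.2 + 1))
        (position_array, 0)
    -- the generator yields the same list object 'a' every time, so list() of the generator
    -- holds the FINAL state of 'a' in every position: (number of yields) copies of final 'a'
    List.replicate r.2 r.1

-- ===== PORT B =====
-- rec(k): iterate the digits into slot k, recursing on the remaining slots; a yield at the
-- bottom contributes one reference to the shared buffer (counted; list() shows its final state)
def pvRecB (digits : List Int) : List Int → (List Int × Nat) → (List Int × Nat)
  | [], st => (st.1, st.2 + 1)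
  | s :: rest, st =>
      digits.foldl (fun st d => pvRecB digits rest (PySem.List.pySetD st.1 s d, st.2)) st

def fill_out_digit_position_array_alt (position_array : List Int) (digits_to_fill_in_slots : List Int) (fillable_slot_value : Int) : List (List Int) :=
  let slots : List Int :=
    (PySem.List.enumerate position_array 0).filterMap
      (fun p => if p.2 = fillable_slot_value then some p.1 else none)
  let r := pvRecB digits_to_fill_in_slots slots (position_array, 0)
  List.replicate r.2 r.1

-- ===== PRECONDITION & SPEC =====
def Spec_fill_out_digit_position_array (position_array : List Int) (digits_to_fill_in_slots : List Int) (fillable_slot_value : Int) (out : List (List Int)) : Prop := out = fill_out_digit_position_array_alt position_array digits_to_fill_in_slots fillable_slot_value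
instance (position_array : List Int) (digits_to_fill_in_slots : List Int) (fillable_slot_value : Int) (out : List (List Int)) : Decidable (Spec_fill_out_digit_position_array position_array digits_to_fill_in_slots fillable_slot_value out) := by unfold Spec_fill_out_digit_position_array; infer_instance

-- ===== CLAIM (what is proved, stated in full; the proofs are below) =====
def Claim_equal_fill_out_digit_position_array : Prop := ∀ (position_array : List Int) (digits_to_fill_in_slots : List Int) (fillable_slot_value : Int), Dom_fill_out_digit_position_array position_array digits_to_fill_in_slots fillable_slot_value → Spec_fill_out_digit_position_array position_array digits_to_fill_in_slots fillable_slot_value (fill_out_digit_position_array position_array digits_to_fill_in_slots fillable_slot_value)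

-- ===== LEMMAS AND PROOFS =====

-- slot positions of the array, as Nat indices
def pvSlots (pa : List Int) (v : Int) : List Nat :=
  (List.range pa.length).filter (fun j => decide (pa.getD j 0 = v))

-- the array with every slot filled with d
def pvFill (pa : List Int) (v d : Int) : List Int :=
  pa.map (fun x => if x = v then d else x)

-- every listed position set to d
def pvSetAll (S : List Nat) (d : Int) (a : List Int) : List Int :=
  S.foldl (fun a i => a.set i d) a

-- the common canonical value of both materialized generators
def pvCanon (pa ds : List Int) (v : Int) : List (List Int) :=
  if pvSlots pa v = [] then [pa]
  else if ds = [] then []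
  else List.replicate (ds.length ^ (pvSlots pa v).length) (pvFill pa v (ds.getLastD 0))

-- invariant of A's mutated array: same length as the original, untouched off the slots
def pvQ (pa : List Int) (v : Int) (a : List Int) : Prop :=
  a.length = pa.length ∧ ∀ j : Nat, j ∉ pvSlots pa v → a[j]? = pa[j]?

theorem pv_map_getD_range (pa : List Int) :
    (List.range pa.length).map (fun j => pa.getD j 0) = pa := by
  apply List.ext_getElem (by simp)
  intro i h1 h2
  simp [List.getD_eq_getElem?_getD, h2]

theorem pvSlots_mem (pa : List Int) (v : Int) (j : Nat) :
    j ∈ pvSlots pa v ↔ j < pa.length ∧ pa.getD j 0 = v := by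
  simp [pvSlots]

theorem pvSlots_length (pa : List Int) (v : Int) :
    (pvSlots pa v).length = pa.countP (fun x => decide (x = v)) := by
  rw [pvSlots, ← List.countP_eq_length_filter]
  conv_rhs => rw [← pv_map_getD_range pa]
  rw [List.countP_map]
  rfl

theorem pv_map_filter (g : Nat → Int) (p : Nat → Bool) (l : List Nat) :
    (l.filter p).map g = l.filterMap (fun a => if p a then some (g a) else none) := by
  induction l with
  | nil => rfl
  | cons a l ih =>
    by_cases hp : p a <;> simp [hp, ih]

theorem pv_foldl_setD_map (d : Int) (S : List Nat) (a : List Int) :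
    (S.map (fun (j : Nat) => (j : Int))).foldl (fun a q => PySem.List.pySetD a q d) a
      = S.foldl (fun a i => a.set i d) a := by
  induction S generalizing a with
  | nil => rfl
  | cons i S ih =>
    simp only [List.map_cons, List.foldl_cons]
    rw [← ih]
    rw [PySem.List.pySetD_of_nonneg _ _ (by positivity), Int.toNat_natCast]

theorem pv_slot_indices_eq (pa : List Int) (v : Int) :
    (PySem.List.enumerate (pa.map (fun x => decide (x = v))) 0).filterMap
        (fun p => if p.2 = true then some p.1 else none)
      = (pvSlots pa v).map (fun (j : Nat) => (j : Int)) := by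
  rw [PySem.List.enumerate_eq_map_pyRange (pa.map (fun x => decide (x = v))) false]
  have hlen : PySem.List.len (pa.map (fun x => decide (x = v))) = (pa.length : Int) := by
    simp [PySem.List.len]
  rw [hlen, PySem.List.pyRange_zero_nat, List.filterMap_map, List.filterMap_map, pvSlots,
    pv_map_filter]
  apply List.filterMap_congr
  intro k hk
  rw [List.mem_range] at hk
  have hval : PySem.List.pyGetD (pa.map (fun x => decide (x = v))) (k : Int) false
      = decide (pa.getD k 0 = v) := by
    rw [PySem.List.pyGetD_eq_getElem _ false (by positivity) (by simp [hk])]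
    simp [List.getD_eq_getElem?_getD, List.getElem?_eq_getElem hk]
  simp only [Function.comp]
  rw [hval]

-- B's slot list (built from enumerate over the array itself) is the same list
theorem pv_slot_indices_eq_b (pa : List Int) (v : Int) :
    (PySem.List.enumerate pa 0).filterMap
        (fun p => if p.2 = v then some p.1 else none)
      = (pvSlots pa v).map (fun (j : Nat) => (j : Int)) := by
  rw [PySem.List.enumerate_eq_map_pyRange pa 0]
  have hlen : PySem.List.len pa = (pa.length : Int) := by simp [PySem.List.len]
  rw [hlen, PySem.List.pyRange_zero_nat, List.filterMap_map, List.filterMap_map, pvSlots,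
    pv_map_filter]
  apply List.filterMap_congr
  intro k hk
  rw [List.mem_range] at hk
  have hval : PySem.List.pyGetD pa (k : Int) 0 = pa.getD k 0 := by
    rw [PySem.List.pyGetD_eq_getElem _ 0 (by positivity) (by simp [hk])]
    simp [List.getD_eq_getElem?_getD, List.getElem?_eq_getElem hk]
  simp only [Function.comp]
  rw [hval]
  simp

theorem pv_foldl_set_getElem? (d : Int) (L : List Nat) (a : List Int) (j : Nat) :
    (L.foldl (fun a i => a.set i d) a)[j]? =
      if j ∈ L then (if j < a.length then some d else none) else a[j]? := by
  induction L generalizing a with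
  | nil => simp
  | cons i L ih =>
    rw [List.foldl_cons, ih, List.length_set]
    by_cases hjL : j ∈ L
    · simp [hjL, List.mem_cons]
    · by_cases hji : j = i
      · subst hji
        simp [hjL, List.getElem?_set]
      · simp [hjL, hji, Ne.symm hji]

theorem pvSetAll_length (S : List Nat) (d : Int) (a : List Int) :
    (pvSetAll S d a).length = a.length := by
  induction S generalizing a with
  | nil => rfl
  | cons i S ih =>
    simp only [pvSetAll, List.foldl_cons]
    rw [show (List.foldl (fun a i => a.set i d) (a.set i d) S) = pvSetAll S d (a.set i d) from rfl,
      ih, List.length_set]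

theorem pv_sum_is_slot (pa : List Int) (v : Int) :
    (((pa.map (fun x => decide (x = v))).map (fun b => if b then (1 : Int) else 0)).sum)
      = (pa.countP (fun x => decide (x = v)) : Int) := by
  rw [List.map_map]
  exact PySem.List.sum_map_ite_one_zero (fun x => decide (x = v)) pa

theorem pv_getLast_eq_getLastD (ds : List Int) (h : ds ≠ []) :
    ds.getLast h = ds.getLastD 0 := by
  cases ds with
  | nil => cases h rfl
  | cons x xs =>
    rw [List.getLastD_eq_getLast?, List.getLast?_eq_some_getLast (by simp : (x :: xs : List Int) ≠ [])]
    rfl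

theorem pvProdRep_length (xs : List Int) (n : Nat) :
    (pvProdRep xs n).length = xs.length ^ n := by
  induction n with
  | zero => simp [pvProdRep]
  | succ n ih =>
    simp only [pvProdRep, List.length_flatMap]
    have : (pvProdRep xs n).map (fun c => (xs.map (fun x => c ++ [x])).length)
        = List.replicate (pvProdRep xs n).length xs.length := by
      rw [← List.map_const']
      apply List.map_congr_left
      intro c _
      simp
    rw [this, List.sum_replicate, smul_eq_mul, ih, pow_succ]

theorem pvProdRep_ne_nil (xs : List Int) (h : xs ≠ []) (n : Nat) :
    pvProdRep xs n ≠ [] := by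
  have hlen := pvProdRep_length xs n
  intro hnil
  rw [hnil] at hlen
  have hpos : 0 < xs.length ^ n := pow_pos (List.length_pos_iff.mpr h) n
  simp at hlen
  omega

theorem pvProdRep_mem_length (xs : List Int) (n : Nat) (c : List Int)
    (hc : c ∈ pvProdRep xs n) : c.length = n := by
  induction n generalizing c with
  | zero => simp [pvProdRep] at hc; simp [hc]
  | succ n ih =>
    simp only [pvProdRep, List.mem_flatMap, List.mem_map] at hc
    obtain ⟨c', hc', x, _, rfl⟩ := hc
    simp [ih c' hc']

theorem pvProdRep_nil (n : Nat) (hn : n ≠ 0) : pvProdRep ([] : List Int) n = [] := by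
  cases n with
  | zero => cases hn rfl
  | succ n => simp [pvProdRep]

theorem pv_getLast?_flatMap (f : List Int → List (List Int)) (L : List (List Int))
    (hL : L ≠ []) (hf : ∀ c ∈ L, f c ≠ []) :
    (L.flatMap f).getLast? = (f (L.getLast hL)).getLast? := by
  induction L with
  | nil => cases hL rfl
  | cons c L ih =>
    cases L with
    | nil => simp
    | cons c2 L2 =>
      have hne : (c2 :: L2 : List (List Int)) ≠ [] := by simp
      have ih2 := ih hne (fun c h => hf c (List.mem_cons_of_mem _ h))
      have h2 : ((c2 :: L2).flatMap f).getLast?.isSome := by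
        rw [ih2, List.getLast?_isSome]
        exact hf _ (List.mem_cons_of_mem _ (List.getLast_mem hne))
      rw [List.flatMap_cons, List.getLast?_append, Option.or_of_isSome h2, ih2,
        List.getLast_cons_cons]

theorem pvProdRep_getLast? (xs : List Int) (h : xs ≠ []) (n : Nat) :
    (pvProdRep xs n).getLast? = some (List.replicate n (xs.getLast h)) := by
  induction n with
  | zero => simp [pvProdRep]
  | succ n ih =>
    have hne := pvProdRep_ne_nil xs h n
    rw [pvProdRep, pv_getLast?_flatMap _ _ hne (fun c _ => by simp [h])]
    have hlast : (pvProdRep xs n).getLast hne = List.replicate n (xs.getLast h) := by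
      have := List.getLast?_eq_some_getLast hne
      rw [ih] at this
      exact (Option.some_injective _ this.symm)
    rw [hlast, List.getLast?_map, List.getLast?_eq_some_getLast h]
    simp [← List.replicate_succ']

theorem pvQ_inner (pa : List Int) (v : Int) (ps : List (Int × Int)) (a : List Int)
    (hps : ∀ p ∈ ps, ∃ m, m < (pvSlots pa v).length ∧ p.1 = (m : Int))
    (hQ : pvQ pa v a) :
    pvQ pa v (ps.foldl
      (fun a p => PySem.List.pySetD a
        (PySem.List.pyGetD ((pvSlots pa v).map (fun (j : Nat) => (j : Int))) p.1 0) p.2) a) := by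
  induction ps generalizing a with
  | nil => exact hQ
  | cons p ps ih =>
    obtain ⟨m, hm, hp1⟩ := hps p (List.mem_cons_self)
    rw [List.foldl_cons]
    refine ih _ (fun q hq => hps q (List.mem_cons_of_mem _ hq)) ?_
    rw [hp1, PySem.List.pyGetD_eq_getElem _ 0 (by positivity) (by simp; omega)]
    simp only [Int.toNat_natCast, List.getElem_map]
    rw [PySem.List.pySetD_of_nonneg _ _ (by positivity)]
    simp only [Int.toNat_natCast]
    constructor
    · rw [List.length_set]; exact hQ.1
    · intro j hj
      have hmem : (pvSlots pa v)[m] ∈ pvSlots pa v := List.getElem_mem _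
      have : (pvSlots pa v)[m] ≠ j := fun he => hj (he ▸ hmem)
      rw [List.getElem?_set, if_neg this]
      exact hQ.2 j hj

theorem pv_apply_replicate (pa : List Int) (v d : Int) (a : List Int)
    (hQ : pvQ pa v a) :
    (PySem.List.enumerate ((PySem.List.slice? (List.replicate (pvSlots pa v).length d) none none (-1)).getD []) 0).foldl
        (fun a p => PySem.List.pySetD a
          (PySem.List.pyGetD ((pvSlots pa v).map (fun (j : Nat) => (j : Int))) p.1 0) p.2) a
      = pvFill pa v d := by
  rw [PySem.List.slice?_none_none_neg_one, Option.getD_some, List.reverse_replicate]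
  rw [PySem.List.enumerate_eq_map_pyRange (List.replicate (pvSlots pa v).length d) d]
  have hget : ∀ j : Int, PySem.List.pyGetD (List.replicate (pvSlots pa v).length d) j d = d := by
    intro j
    rw [PySem.List.pyGetD, PySem.List.pyGet?]
    cases hidx : PySem.List.pyIdx? (List.replicate (pvSlots pa v).length d).length j with
    | none => simp
    | some k =>
      simp only [Option.bind, List.getElem?_replicate]
      split <;> simp
  have hmapeq : (List.map (fun j => (j, PySem.List.pyGetD (List.replicate (pvSlots pa v).length d) j d))
      (PySem.List.pyRange 0 (PySem.List.len (List.replicate (pvSlots pa v).length d))))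
      = List.map (fun j => (j, d)) (PySem.List.pyRange 0 (PySem.List.len ((pvSlots pa v).map (fun (j : Nat) => (j : Int))))) := by
    have : PySem.List.len (List.replicate (pvSlots pa v).length d)
        = PySem.List.len ((pvSlots pa v).map (fun (j : Nat) => (j : Int))) := by
      simp [PySem.List.len]
    rw [this]
    apply List.map_congr_left
    intro j _
    rw [hget j]
  rw [hmapeq, List.foldl_map]
  rw [PySem.List.foldl_pyRange_zero_pyGetD ((pvSlots pa v).map (fun (j : Nat) => (j : Int))) 0
    (fun a q => PySem.List.pySetD a q d) a]
  rw [pv_foldl_setD_map]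
  apply List.ext_getElem?
  intro j
  rw [pv_foldl_set_getElem?]
  by_cases hj : j ∈ pvSlots pa v
  · have hjlen : j < pa.length := ((pvSlots_mem pa v j).mp hj).1
    have hjv : pa.getD j 0 = v := ((pvSlots_mem pa v j).mp hj).2
    rw [if_pos hj, if_pos (hQ.1 ▸ hjlen)]
    rw [pvFill, List.getElem?_map, List.getElem?_eq_getElem hjlen]
    have : pa[j] = v := by rwa [List.getD_eq_getElem _ _ hjlen] at hjv
    simp [this]
  · rw [if_neg hj, hQ.2 j hj, pvFill, List.getElem?_map]
    by_cases hjlen : j < pa.length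
    · have hjv : ¬ (pa.getD j 0 = v) := fun hv => hj ((pvSlots_mem pa v j).mpr ⟨hjlen, hv⟩)
      rw [List.getD_eq_getElem _ _ hjlen] at hjv
      rw [List.getElem?_eq_getElem hjlen]
      simp [hjv]
    · rw [List.getElem?_eq_none (by omega)]
      simp

theorem pv_main_fold (pa : List Int) (v : Int) (L : List (List Int)) (a : List Int) (cnt : Nat)
    (hQ : pvQ pa v a) (hL : ∀ c ∈ L, c.length = (pvSlots pa v).length) :
    (L.foldl
        (fun (st : List Int × Nat) combo =>
          ((PySem.List.enumerate ((PySem.List.slice? combo none none (-1)).getD []) 0).foldl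
              (fun a p => PySem.List.pySetD a
                (PySem.List.pyGetD ((pvSlots pa v).map (fun (j : Nat) => (j : Int))) p.1 0) p.2) st.1,
           st.2 + 1)) (a, cnt)).2 = cnt + L.length
    ∧ pvQ pa v (L.foldl
        (fun (st : List Int × Nat) combo =>
          ((PySem.List.enumerate ((PySem.List.slice? combo none none (-1)).getD []) 0).foldl
              (fun a p => PySem.List.pySetD a
                (PySem.List.pyGetD ((pvSlots pa v).map (fun (j : Nat) => (j : Int))) p.1 0) p.2) st.1,
           st.2 + 1)) (a, cnt)).1
    ∧ (∀ c, L.getLast? = some c → ∃ a', pvQ pa v a' ∧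
        (L.foldl
          (fun (st : List Int × Nat) combo =>
            ((PySem.List.enumerate ((PySem.List.slice? combo none none (-1)).getD []) 0).foldl
                (fun a p => PySem.List.pySetD a
                  (PySem.List.pyGetD ((pvSlots pa v).map (fun (j : Nat) => (j : Int))) p.1 0) p.2) st.1,
             st.2 + 1)) (a, cnt)).1
          = (PySem.List.enumerate ((PySem.List.slice? c none none (-1)).getD []) 0).foldl
              (fun a p => PySem.List.pySetD a
                (PySem.List.pyGetD ((pvSlots pa v).map (fun (j : Nat) => (j : Int))) p.1 0) p.2) a') := by
  induction L generalizing a cnt with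
  | nil => exact ⟨rfl, hQ, fun c hc => by simp at hc⟩
  | cons c L ih =>
    have hQ1 : pvQ pa v ((PySem.List.enumerate ((PySem.List.slice? c none none (-1)).getD []) 0).foldl
        (fun a p => PySem.List.pySetD a
          (PySem.List.pyGetD ((pvSlots pa v).map (fun (j : Nat) => (j : Int))) p.1 0) p.2) a) := by
      apply pvQ_inner pa v _ a _ hQ
      intro p hp
      rw [PySem.List.slice?_none_none_neg_one, Option.getD_some] at hp
      rw [PySem.List.mem_enumerate_iff] at hp
      obtain ⟨k, hk, rfl⟩ := hp
      refine ⟨k, ?_, by simp⟩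
      rw [List.length_reverse] at hk
      rw [← hL c List.mem_cons_self]
      exact hk
    rw [List.foldl_cons]
    obtain ⟨h1, h2, h3⟩ := ih _ (cnt + 1) hQ1 (fun c' hc' => hL c' (List.mem_cons_of_mem _ hc'))
    refine ⟨by rw [h1]; simp [List.length_cons]; omega, h2, ?_⟩
    intro c' hc'
    cases L with
    | nil =>
      simp only [List.getLast?_singleton, Option.some.injEq] at hc'
      subst hc'
      exact ⟨a, hQ, by simp⟩
    | cons c2 L2 =>
      rw [List.getLast?_cons_cons] at hc'
      exact h3 c' hc'

-- A's materialized value is the canonical replicate form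
theorem pvA_eq_canon (pa ds : List Int) (v : Int) :
    fill_out_digit_position_array pa ds v = pvCanon pa ds v := by
  simp only [fill_out_digit_position_array, pvCanon]
  rw [pv_slot_indices_eq pa v, pv_sum_is_slot pa v]
  have hlenS : (pvSlots pa v).length = pa.countP (fun x => decide (x = v)) :=
    pvSlots_length pa v
  by_cases hk : pa.countP (fun x => decide (x = v)) = 0
  · have hS : pvSlots pa v = [] := List.length_eq_zero_iff.mp (by omega)
    simp [hk, hS]
  · have hS : ¬ (pvSlots pa v = []) := by
      intro h; rw [h] at hlenS; simp at hlenS; omega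
    rw [if_neg (by exact_mod_cast hk), if_neg hS]
    by_cases hds : ds = []
    · subst hds
      rw [if_pos rfl, Int.toNat_natCast, pvProdRep_nil _ hk]
      simp
    · rw [if_neg hds, Int.toNat_natCast]
      have hQ0 : pvQ pa v pa := ⟨rfl, fun _ _ => rfl⟩
      obtain ⟨h1, _, h3⟩ := pv_main_fold pa v
        (pvProdRep ds (pa.countP (fun x => decide (x = v)))) pa 0 hQ0
        (fun c hc => (pvProdRep_mem_length ds _ c hc).trans hlenS.symm)
      have hget : (pvProdRep ds (pa.countP (fun x => decide (x = v)))).getLast?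
          = some (List.replicate (pvSlots pa v).length (ds.getLast hds)) := by
        rw [pvProdRep_getLast? ds hds, hlenS]
      obtain ⟨a', hQ', heq⟩ := h3 _ hget
      rw [heq, pv_apply_replicate pa v (ds.getLast hds) a' hQ']
      rw [h1, pvProdRep_length, pv_getLast_eq_getLastD ds hds, hlenS]
      simp

-- ===== B side =====

-- Nat-index model of pvRecB
def pvRecN (ds : List Int) : List Nat → (List Int × Nat) → (List Int × Nat)
  | [], st => (st.1, st.2 + 1)
  | s :: rest, st =>
      ds.foldl (fun st d => pvRecN ds rest (st.1.set s d, st.2)) st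

theorem pvRecB_eq_recN (ds : List Int) (S : List Nat) (st : List Int × Nat) :
    pvRecB ds (S.map (fun (j : Nat) => (j : Int))) st = pvRecN ds S st := by
  induction S generalizing st with
  | nil => rfl
  | cons s S ih =>
    simp only [List.map_cons, pvRecB, pvRecN]
    have hfun : (fun (st : List Int × Nat) (d : Int) =>
        pvRecB ds (S.map (fun (j : Nat) => (j : Int))) (PySem.List.pySetD st.1 (s : Int) d, st.2))
        = (fun (st : List Int × Nat) (d : Int) => pvRecN ds S (st.1.set s d, st.2)) := by
      funext st d
      rw [PySem.List.pySetD_of_nonneg _ _ (by positivity), Int.toNat_natCast, ih]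
    rw [hfun]

theorem pvSetAll_getElem? (S : List Nat) (d : Int) (a : List Int) (j : Nat) :
    (pvSetAll S d a)[j]? = if j ∈ S then (if j < a.length then some d else none) else a[j]? :=
  pv_foldl_set_getElem? d S a j

-- rewriting pvSetAll over a buffer that agrees off {s} ∪ R gives the same list
theorem pvSetAll_set_congr (R : List Nat) (s : Nat) (d x : Int) (a b : List Int)
    (hlen : a.length = b.length)
    (hoff : ∀ j : Nat, j ≠ s → j ∉ R → a[j]? = b[j]?) :
    pvSetAll R d (a.set s x) = pvSetAll R d (b.set s x) := by
  apply List.ext_getElem?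
  intro j
  rw [pvSetAll_getElem?, pvSetAll_getElem?, List.length_set, List.length_set, hlen]
  by_cases hjR : j ∈ R
  · simp [hjR]
  · rw [if_neg hjR, if_neg hjR, List.getElem?_set, List.getElem?_set, hlen]
    by_cases hjs : s = j
    · simp [hjs]
    · have := hoff j (fun h => hjs h.symm) hjR
      simp [hjs, this]

theorem pvRecN_spec (ds : List Int) (hds : ds ≠ []) (S : List Nat) (a : List Int) (c : Nat) :
    pvRecN ds S (a, c) = (pvSetAll S (ds.getLastD 0) a, c + ds.length ^ S.length) := by
  induction S generalizing a c with
  | nil => simp [pvRecN, pvSetAll]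
  | cons s R ih =>
    rw [pvRecN]
    -- fold over a nonempty suffix t of ds, from a buffer b agreeing with a off {s} ∪ R
    have key : ∀ (t : List Int), t ≠ [] → ∀ (b : List Int) (c' : Nat),
        b.length = a.length → (∀ j : Nat, j ≠ s → j ∉ R → b[j]? = a[j]?) →
        t.foldl (fun st d => pvRecN ds R (st.1.set s d, st.2)) (b, c')
          = (pvSetAll R (ds.getLastD 0) (a.set s (t.getLastD 0)),
             c' + t.length * ds.length ^ R.length) := by
      intro t
      induction t with
      | nil => intro h; cases h rfl
      | cons x t iht =>
        intro _ b c' hblen hboff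
        rw [List.foldl_cons, ih]
        cases t with
        | nil =>
          simp only [List.foldl_nil]
          rw [pvSetAll_set_congr R s (ds.getLastD 0) x b a hblen hboff]
          simp
        | cons y t2 =>
          have hb'len : (pvSetAll R (ds.getLastD 0) (b.set s x)).length = a.length := by
            rw [pvSetAll_length, List.length_set, hblen]
          have hb'off : ∀ j : Nat, j ≠ s → j ∉ R →
              (pvSetAll R (ds.getLastD 0) (b.set s x))[j]? = a[j]? := by
            intro j hjs hjR
            rw [pvSetAll_getElem?, if_neg hjR, List.getElem?_set,
              if_neg (by exact fun h => hjs h.symm)]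
            exact hboff j hjs hjR
          rw [iht (by simp) _ _ hb'len hb'off]
          simp only [Prod.mk.injEq]
          refine ⟨by simp [List.getLastD], ?_⟩
          simp only [List.length_cons]
          ring
    have := key ds hds a c rfl (fun _ _ _ => rfl)
    rw [this]
    simp only [Prod.mk.injEq]
    refine ⟨by simp only [pvSetAll, List.foldl_cons], ?_⟩
    simp only [List.length_cons, pow_succ]
    ring

theorem pvSetAll_slots_eq_fill (pa : List Int) (v d : Int) :
    pvSetAll (pvSlots pa v) d pa = pvFill pa v d := by
  apply List.ext_getElem?
  intro j
  rw [pvSetAll_getElem?]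
  by_cases hj : j ∈ pvSlots pa v
  · have hjlen : j < pa.length := ((pvSlots_mem pa v j).mp hj).1
    have hjv : pa.getD j 0 = v := ((pvSlots_mem pa v j).mp hj).2
    rw [if_pos hj, if_pos hjlen, pvFill, List.getElem?_map, List.getElem?_eq_getElem hjlen]
    have : pa[j] = v := by rwa [List.getD_eq_getElem _ _ hjlen] at hjv
    simp [this]
  · rw [if_neg hj, pvFill, List.getElem?_map]
    by_cases hjlen : j < pa.length
    · have hjv : ¬ (pa.getD j 0 = v) := fun hv => hj ((pvSlots_mem pa v j).mpr ⟨hjlen, hv⟩)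
      rw [List.getD_eq_getElem _ _ hjlen] at hjv
      rw [List.getElem?_eq_getElem hjlen]
      simp [hjv]
    · rw [List.getElem?_eq_none (by omega)]
      simp

-- B's materialized value is the same canonical replicate form
theorem pvB_eq_canon (pa ds : List Int) (v : Int) :
    fill_out_digit_position_array_alt pa ds v = pvCanon pa ds v := by
  simp only [fill_out_digit_position_array_alt, pvCanon]
  rw [pv_slot_indices_eq_b pa v, pvRecB_eq_recN]
  by_cases hS : pvSlots pa v = []
  · simp [hS, pvRecN]
  · rw [if_neg hS]
    by_cases hds : ds = []
    · subst hds
      obtain ⟨s, R, hSR⟩ := List.exists_cons_of_ne_nil hS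
      rw [hSR, if_pos rfl]
      simp [pvRecN]
    · rw [if_neg hds, pvRecN_spec ds hds]
      rw [pvSetAll_slots_eq_fill]
      simp

-- ===== VERDICT (by name: the statement is the Claim_ definition above) =====
theorem fill_out_digit_position_array_spec : Claim_equal_fill_out_digit_position_array := by
  intro pa ds v _
  unfold Spec_fill_out_digit_position_array
  rw [pvA_eq_canon, pvB_eq_canon]
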